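-- pv_equiv track=rewrite | github.com/rainbay001-dotcom/xPU-simulator | xpu_simulator/backends/npu/cost_model.py | _tile_candidates
-- ===== SOURCE A (Python) =====
-- def _tile_candidates(max_dim: int, tile: int) -> list[int]:
--     """Generate tile size candidates aligned to `tile`, from small to large."""
--     candidates = []
--     t = tile
--     while t <= max_dim:
--         candidates.append(t)
--         t *= 2
--     if not candidates:
--         candidates = [tile]
--     return candidates
-- ===== SOURCE B (Python) =====
-- def _tile_candidates(max_dim: int, tile: int) -> list[int]:
--     """Generate tile size candidates aligned to `tile`, from small to large."""
--     n = (max_dim // tile).bit_length() if 0 < tile <= max_dim else 0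
--     return [tile << i for i in range(n)] or [tile]
-- ===== Notes on version B (the rewrite author's own statement) =====
-- stated objective: simpler
-- what changed: Replaces the step-by-step doubling while-loop with an arithmetic count of candidates via (max_dim // tile).bit_length() followed by one bulk comprehension [tile << i for i in range(n)]; Pre_ excludes tile <= 0 with tile <= max_dim, where A's loop never terminates.
import Mathlib
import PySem

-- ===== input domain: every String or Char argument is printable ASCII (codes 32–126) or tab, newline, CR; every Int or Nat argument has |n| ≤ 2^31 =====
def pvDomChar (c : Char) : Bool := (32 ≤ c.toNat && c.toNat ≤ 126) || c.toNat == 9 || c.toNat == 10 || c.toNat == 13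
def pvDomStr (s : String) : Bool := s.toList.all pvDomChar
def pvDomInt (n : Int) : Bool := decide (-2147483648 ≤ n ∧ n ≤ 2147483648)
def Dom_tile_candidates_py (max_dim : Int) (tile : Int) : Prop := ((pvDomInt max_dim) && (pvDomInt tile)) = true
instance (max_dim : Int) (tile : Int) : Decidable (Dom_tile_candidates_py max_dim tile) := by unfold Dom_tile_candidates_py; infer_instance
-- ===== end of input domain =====

-- B replaces A's step-by-step doubling loop by an arithmetic count ((max_dim // tile).bit_length())
-- plus one bulk list construction; Pre_ excludes the inputs on which A's loop never terminates.


-- ===== PORT A =====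
-- A's while loop; the fuel argument only makes the recursion total in Lean (64 iterations are
-- more than enough on Dom ∩ Pre_, where t at least doubles each step).
def tcLoopA (fuel : Nat) (max_dim : Int) (t : Int) (acc : List Int) : List Int :=
  match fuel with
  | 0 => acc
  | fuel + 1 => if t ≤ max_dim then tcLoopA fuel max_dim (t * 2) (acc ++ [t]) else acc

def tile_candidates_py (max_dim : Int) (tile : Int) : List Int :=
  let candidates := tcLoopA 64 max_dim tile []
  if candidates = [] then [tile] else candidates

-- ===== PORT B =====
def tile_candidates_py_alt (max_dim : Int) (tile : Int) : List Int :=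
  let n : Nat := if 0 < tile ∧ tile ≤ max_dim
    then PySem.Int.bitLength (PySem.Int.floordiv max_dim tile) else 0
  let lst := (List.range n).map (fun i => tile * 2 ^ i)
  if lst = [] then [tile] else lst

-- ===== PRECONDITION & SPEC =====
-- Pre_ excludes exactly the inputs (tile ≤ 0 together with tile ≤ max_dim) on which A's while
-- loop never terminates (t never grows past max_dim), i.e. A returns no value there.
def Pre_tile_candidates_py (max_dim : Int) (tile : Int) : Prop := 1 ≤ tile ∨ max_dim < tile
instance (max_dim : Int) (tile : Int) : Decidable (Pre_tile_candidates_py max_dim tile) := by unfold Pre_tile_candidates_py; infer_instance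
def pvWitness_tile_candidates_py : Int × Int := (100, 3)

def Spec_tile_candidates_py (max_dim : Int) (tile : Int) (out : List Int) : Prop := out = tile_candidates_py_alt max_dim tile
instance (max_dim : Int) (tile : Int) (out : List Int) : Decidable (Spec_tile_candidates_py max_dim tile out) := by unfold Spec_tile_candidates_py; infer_instance

-- ===== CLAIM (what is proved, stated in full; the proofs are below) =====
def Claim_equal_tile_candidates_py : Prop := ∀ (max_dim : Int) (tile : Int), Dom_tile_candidates_py max_dim tile → Pre_tile_candidates_py max_dim tile → Spec_tile_candidates_py max_dim tile (tile_candidates_py max_dim tile)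

-- ===== LEMMAS AND PROOFS =====

-- the number of iterations A's loop performs, as B computes it
def kCount (max_dim : Int) (t : Int) : Nat :=
  if t ≤ max_dim then PySem.Int.bitLength (PySem.Int.floordiv max_dim t) else 0

lemma kCount_succ (max_dim t : Int) (ht : 1 ≤ t) (hle : t ≤ max_dim) :
    kCount max_dim t = kCount max_dim (t * 2) + 1 := by
  have ht' : (0:Int) < t := by omega
  have hq : 0 < PySem.Int.floordiv max_dim t := by
    rw [show (0:Int) < PySem.Int.floordiv max_dim t ↔ 1 ≤ PySem.Int.floordiv max_dim t by omega,
        PySem.Int.le_floordiv_iff_mul_le ht']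
    omega
  have hhalf : PySem.Int.floordiv (PySem.Int.floordiv max_dim t) 2
      = PySem.Int.floordiv max_dim (t * 2) := by
    rw [PySem.Int.floordiv_eq_ediv_of_pos ht', PySem.Int.floordiv_eq_ediv_of_pos (by omega : (0:Int) < 2),
        PySem.Int.floordiv_eq_ediv_of_pos (by omega : (0:Int) < t * 2)]
    exact Int.ediv_ediv_of_nonneg ht'.le
  rw [kCount, if_pos hle, PySem.Int.bitLength_of_pos hq, hhalf]
  by_cases h2 : t * 2 ≤ max_dim
  · rw [kCount, if_pos h2]
  · have h0 : PySem.Int.floordiv max_dim (t * 2) = 0 := by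
      rw [PySem.Int.floordiv_eq_iff_of_pos (by omega : (0:Int) < t * 2)]
      constructor <;> omega
    rw [kCount, if_neg h2, h0, PySem.Int.bitLength_zero]

lemma loopA_eq (fuel : Nat) (max_dim t : Int) (ht : 1 ≤ t)
    (hbig : max_dim < t * 2 ^ fuel) (acc : List Int) :
    tcLoopA fuel max_dim t acc
      = acc ++ (List.range (kCount max_dim t)).map (fun i => t * 2 ^ i) := by
  induction fuel generalizing t acc with
  | zero =>
    have hlt : max_dim < t := by simpa using hbig
    rw [tcLoopA, kCount, if_neg (by omega)]
    simp
  | succ fuel ih =>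
    rw [tcLoopA]
    by_cases hle : t ≤ max_dim
    · rw [if_pos hle, ih (t * 2) (by omega) (by rw [pow_succ] at hbig; linarith) (acc ++ [t]),
          kCount_succ max_dim t ht hle, List.range_succ_eq_map]
      simp only [List.map_cons, List.map_map, pow_zero, mul_one, List.append_assoc,
        List.singleton_append]
      congr 1
      congr 1
      apply List.map_congr_left
      intro i _
      simp [pow_succ]
      ring
    · rw [if_neg hle, kCount, if_neg hle]
      simp

theorem tile_candidates_py_spec : Claim_equal_tile_candidates_py := by
  intro max_dim tile hdom hpre
  unfold Spec_tile_candidates_py tile_candidates_py tile_candidates_py_alt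
  have hd : -2147483648 ≤ max_dim ∧ max_dim ≤ 2147483648 ∧
      -2147483648 ≤ tile ∧ tile ≤ 2147483648 := by
    have := hdom
    unfold Dom_tile_candidates_py pvDomInt at this
    simp only [Bool.and_eq_true, decide_eq_true_eq] at this
    tauto
  by_cases ht : 1 ≤ tile
  · have hbig : max_dim < tile * 2 ^ 64 := by
      have h1 : (1:Int) * 2 ^ 64 ≤ tile * 2 ^ 64 :=
        mul_le_mul_of_nonneg_right ht (by positivity)
      have : (2147483648:Int) < 1 * 2 ^ 64 := by norm_num
      omega
    rw [loopA_eq 64 max_dim tile ht hbig []]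
    simp only [List.nil_append]
    by_cases hle : tile ≤ max_dim
    · have hk : kCount max_dim tile = kCount max_dim (tile * 2) + 1 :=
        kCount_succ max_dim tile ht hle
      rw [if_pos (by constructor <;> omega : 0 < tile ∧ tile ≤ max_dim)]
      rw [show PySem.Int.bitLength (PySem.Int.floordiv max_dim tile)
            = kCount max_dim tile by rw [kCount, if_pos hle]]
    · rw [kCount, if_neg hle, if_neg (by omega : ¬ (0 < tile ∧ tile ≤ max_dim))]
  · -- tile ≤ 0, hence max_dim < tile by Pre_: the loop exits immediately on both sides
    have hlt : max_dim < tile := by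
      rcases hpre with h | h
      · omega
      · exact h
    rw [show tcLoopA 64 max_dim tile [] = [] by rw [tcLoopA, if_neg (by omega)]]
    rw [if_neg (by omega : ¬ (0 < tile ∧ tile ≤ max_dim))]
    simp
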